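-- pv_equiv track=rewrite | github.com/thinnguyen625/Data-Mining-Lab01 | Source/B1/19_B1.py | sortField
-- ===== SOURCE A (Python) =====
-- def sortField(data):
--     if data:
--         field = []
--         for i in data:
--             if i != '':
--                 field.append(i)
--         for i in range(0, len(field)-1):
--             if field[i] != '':
--                 for j in range(i, len(field)):
--                     if field[j] != '':
--                         if field[j] < field[i]:
--                             temp = field[i]
--                             field[i] = field[j]
--                             field[j] = temp
--         return field
--     return None
-- ===== SOURCE B (Python) =====
-- def sortField(data):
--     if not data:
--         return None
--     return sorted(s for s in data if s != '')
-- ===== Notes on version B (the rewrite author's own statement) =====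
-- stated objective: faster
-- what changed: Replaces the append-loop filter plus in-place quadratic min-swap selection sort with a single filtering pass handed to the built-in sorted().
import Mathlib
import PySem

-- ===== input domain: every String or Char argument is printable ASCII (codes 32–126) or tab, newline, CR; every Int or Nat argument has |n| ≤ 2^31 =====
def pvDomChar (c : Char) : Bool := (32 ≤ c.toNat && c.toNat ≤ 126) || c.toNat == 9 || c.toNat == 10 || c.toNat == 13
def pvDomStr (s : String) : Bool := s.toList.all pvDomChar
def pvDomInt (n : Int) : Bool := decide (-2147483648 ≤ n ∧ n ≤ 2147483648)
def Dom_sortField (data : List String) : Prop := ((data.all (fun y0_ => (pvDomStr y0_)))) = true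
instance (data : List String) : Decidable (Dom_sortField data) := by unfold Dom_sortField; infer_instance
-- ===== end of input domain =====

-- B replaces A's in-place quadratic min-swap selection sort by one filtering pass fed to the
-- built-in sort (objective: faster).

-- ===== PORT A =====
-- one step of the inner 'for j in range(i, len(field))' loop
def sortFieldInner (i : Nat) (f : List String) (j : Nat) : List String :=
  if f.getD j "" ≠ "" then
    if f.getD j "" < f.getD i "" then
      let temp := f.getD i ""
      (f.set i (f.getD j "")).set j temp
    else f
  else f

-- one step of the outer 'for i in range(0, len(field)-1)' loop
def sortFieldOuter (f : List String) (i : Nat) : List String :=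
  if f.getD i "" ≠ "" then (List.range' i (f.length - i)).foldl (sortFieldInner i) f
  else f

def sortField (data : List String) : Option (List String) :=
  if data ≠ [] then
    let field := data.foldl (fun f x => if x ≠ "" then f ++ [x] else f) []
    some ((List.range (field.length - 1)).foldl sortFieldOuter field)
  else none

-- ===== PORT B =====
def sortField_alt (data : List String) : Option (List String) :=
  if data ≠ [] then
    some (PySem.List.sorted (data.filter (fun s => s ≠ "")) (fun x => x) false)
  else none

-- ===== PRECONDITION & SPEC =====
def Spec_sortField (data : List String) (out : Option (List String)) : Prop := out = sortField_alt data
instance (data : List String) (out : Option (List String)) : Decidable (Spec_sortField data out) := by unfold Spec_sortField; infer_instance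

-- ===== CLAIM (what is proved, stated in full; the proofs are below) =====
def Claim_equal_sortField : Prop := ∀ (data : List String), Dom_sortField data → Spec_sortField data (sortField data)

-- ===== LEMMAS AND PROOFS =====

-- 'go c rest' models what one inner pass does to the suffix starting at i: it returns the
-- running minimum and the list of values pushed back at the scanned positions.
def pvGo (c : String) : List String → String × List String
  | [] => (c, [])
  | y :: ys => if y < c then ((pvGo y ys).1, c :: (pvGo y ys).2)
               else ((pvGo c ys).1, y :: (pvGo c ys).2)

theorem pvGo_perm (c : String) (ys : List String) :
    ((pvGo c ys).1 :: (pvGo c ys).2).Perm (c :: ys) := by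
  induction ys generalizing c with
  | nil => simp [pvGo]
  | cons y ys ih =>
    by_cases h : y < c
    · simp only [pvGo, if_pos h]
      exact (List.Perm.swap c (pvGo y ys).1 (pvGo y ys).2).trans ((ih y).cons c)
    · simp only [pvGo, if_neg h]
      exact ((List.Perm.swap y (pvGo c ys).1 (pvGo c ys).2).trans ((ih c).cons y)).trans
        (List.Perm.swap c y ys)

theorem pvGo_min (c : String) (ys : List String) :
    (pvGo c ys).1 ≤ c ∧ ∀ z ∈ (pvGo c ys).2, (pvGo c ys).1 ≤ z := by
  induction ys generalizing c with
  | nil => simp [pvGo]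
  | cons y ys ih =>
    by_cases h : y < c
    · simp only [pvGo, if_pos h]
      refine ⟨le_of_lt (lt_of_le_of_lt (ih y).1 h), ?_⟩
      intro z hz
      rcases List.mem_cons.mp hz with rfl | hz
      · exact le_of_lt (lt_of_le_of_lt (ih y).1 h)
      · exact (ih y).2 z hz
    · simp only [pvGo, if_neg h]
      refine ⟨(ih c).1, ?_⟩
      intro z hz
      rcases List.mem_cons.mp hz with rfl | hz
      · exact le_trans (ih c).1 (le_of_not_gt h)
      · exact (ih c).2 z hz

-- the result of the whole outer loop after k steps, phrased structurally
def pvSsel : Nat → List String → List String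
  | 0, l => l
  | _ + 1, [] => []
  | k + 1, c :: rest => (pvGo c rest).1 :: pvSsel k (pvGo c rest).2

theorem pvSsel_perm (k : Nat) (l : List String) : (pvSsel k l).Perm l := by
  induction k generalizing l with
  | zero => simp [pvSsel]
  | succ k ih =>
    cases l with
    | nil => simp [pvSsel]
    | cons c rest =>
      exact (((ih _).cons (pvGo c rest).1)).trans (pvGo_perm c rest)

theorem pvSsel_pairwise (k : Nat) (l : List String) (hk : l.length ≤ k + 1) :
    (pvSsel k l).Pairwise (· ≤ ·) := by
  induction k generalizing l with
  | zero =>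
    match l, hk with
    | [], _ => simp [pvSsel]
    | [a], _ => simp [pvSsel]
  | succ k ih =>
    cases l with
    | nil => simp [pvSsel]
    | cons c rest =>
      have hlen : (pvGo c rest).2.length = rest.length := by
        have := (pvGo_perm c rest).length_eq
        simpa using this
      refine List.pairwise_cons.mpr ⟨?_, ih _ (by rw [hlen]; simp at hk; omega)⟩
      intro z hz
      have hz' : z ∈ (pvGo c rest).2 := (pvSsel_perm k _).mem_iff.mp hz
      exact (pvGo_min c rest).2 z hz'

theorem pvGetD_append (P R : List String) (c : String) :
    (P ++ c :: R).getD P.length "" = c := by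
  simp

theorem pvSet_append (P R : List String) (c v : String) :
    (P ++ c :: R).set P.length v = P ++ v :: R := by
  induction P with
  | nil => simp
  | cons p P ih => simp [ih]

-- the inner loop, run over indices j, j+1, … with P the prefix before position i,
-- Q the already-scanned part strictly between i and j
theorem pvInner_run (rest : List String) (P Q : List String) (c : String)
    (hc : c ≠ "") (hrest : ∀ x ∈ rest, x ≠ "") :
    (List.range' (P.length + 1 + Q.length) rest.length).foldl (sortFieldInner P.length)
        (P ++ c :: (Q ++ rest))
      = P ++ (pvGo c rest).1 :: (Q ++ (pvGo c rest).2) := by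
  induction rest generalizing Q c with
  | nil => simp [pvGo]
  | cons y ys ih =>
    have hy : y ∈ y :: ys := List.mem_cons_self
    have hyne : y ≠ "" := hrest y hy
    have hgj : (P ++ c :: (Q ++ y :: ys)).getD (P.length + 1 + Q.length) "" = y := by
      have : P ++ c :: (Q ++ y :: ys) = (P ++ c :: Q) ++ y :: ys := by simp
      rw [this]
      have hl : (P ++ c :: Q).length = P.length + 1 + Q.length := by simp; omega
      rw [← hl]; exact pvGetD_append _ _ _
    have hgi : (P ++ c :: (Q ++ y :: ys)).getD P.length "" = c := pvGetD_append _ _ _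
    rw [List.length_cons, List.range'_succ, List.foldl_cons]
    by_cases h : y < c
    · have hstep : sortFieldInner P.length (P ++ c :: (Q ++ y :: ys)) (P.length + 1 + Q.length)
          = P ++ y :: (Q ++ c :: ys) := by
        unfold sortFieldInner
        rw [hgj, hgi, if_pos hyne, if_pos h]
        rw [pvSet_append]
        have : P ++ y :: (Q ++ c :: ys) = (P ++ y :: Q) ++ c :: ys := by simp
        rw [this]
        have h2 : P ++ y :: (Q ++ y :: ys) = (P ++ y :: Q) ++ y :: ys := by simp
        rw [h2]
        have hl : (P ++ y :: Q).length = P.length + 1 + Q.length := by simp; omega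
        rw [← hl]; exact pvSet_append _ _ _ _
      rw [hstep]
      have := ih (Q ++ [c]) y hyne (fun x hx => hrest x (List.mem_cons_of_mem _ hx))
      simp only [List.append_assoc, List.cons_append, List.nil_append] at this
      have harith : P.length + 1 + Q.length + 1 = P.length + 1 + (Q ++ [c]).length := by
        simp only [List.length_append, List.length_cons, List.length_nil]; omega
      rw [harith, this]
      simp only [pvGo]
      rw [if_pos h]
    · have hstep : sortFieldInner P.length (P ++ c :: (Q ++ y :: ys)) (P.length + 1 + Q.length)
          = P ++ c :: (Q ++ y :: ys) := by
        unfold sortFieldInner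
        rw [hgj, hgi, if_pos hyne, if_neg h]
      rw [hstep]
      have := ih (Q ++ [y]) c hc (fun x hx => hrest x (List.mem_cons_of_mem _ hx))
      simp only [List.append_assoc, List.cons_append, List.nil_append] at this
      have harith : P.length + 1 + Q.length + 1 = P.length + 1 + (Q ++ [y]).length := by
        simp only [List.length_append, List.length_cons, List.length_nil]; omega
      rw [harith, this]
      simp only [pvGo]
      rw [if_neg h]

theorem pvOuter_noop (k j : Nat) (f : List String) (hj : f.length ≤ j) :
    (List.range' j k).foldl sortFieldOuter f = f := by
  induction k generalizing j with
  | zero => simp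
  | succ k ih =>
    rw [List.range'_succ, List.foldl_cons]
    have : sortFieldOuter f j = f := by
      unfold sortFieldOuter
      rw [if_neg (by simp [List.getD_eq_getElem?_getD, List.getElem?_eq_none hj])]
    rw [this]
    exact ih (j + 1) (by omega)

theorem pvOuter_run (k : Nat) (P l : List String)
    (hl : ∀ x ∈ l, x ≠ "") :
    (List.range' P.length k).foldl sortFieldOuter (P ++ l) = P ++ pvSsel k l := by
  induction k generalizing P l with
  | zero => simp [pvSsel]
  | succ k ih =>
    cases l with
    | nil =>
      simp only [pvSsel, List.append_nil]
      exact pvOuter_noop (k + 1) P.length P (by simp)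
    | cons c rest =>
      rw [List.range'_succ, List.foldl_cons]
      have hc : c ≠ "" := hl c List.mem_cons_self
      have hstep : sortFieldOuter (P ++ c :: rest) P.length
          = P ++ (pvGo c rest).1 :: (pvGo c rest).2 := by
        unfold sortFieldOuter
        rw [if_pos (by simpa [pvGetD_append] using hc)]
        have hlen : (P ++ c :: rest).length - P.length = rest.length + 1 := by
          simp
        rw [hlen, List.range'_succ, List.foldl_cons]
        have hfirst : sortFieldInner P.length (P ++ c :: rest) P.length = P ++ c :: rest := by
          unfold sortFieldInner
          rw [pvGetD_append, if_pos hc, if_neg (lt_irrefl c)]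
        rw [hfirst]
        have := pvInner_run rest P [] c hc
          (fun x hx => hl x (List.mem_cons_of_mem _ hx))
        simpa using this
      rw [hstep]
      have hrest' : ∀ x ∈ (pvGo c rest).2, x ≠ "" := by
        intro x hx
        have : x ∈ c :: rest := (pvGo_perm c rest).subset (List.mem_cons_of_mem _ hx)
        exact hl x this
      have := ih (P ++ [(pvGo c rest).1]) (pvGo c rest).2 hrest'
      simp only [List.append_assoc, List.cons_append, List.nil_append] at this
      have harith : P.length + 1 = (P ++ [(pvGo c rest).1]).length := by simp
      rw [harith, this]
      simp [pvSsel]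

theorem pvFilter_fold (data acc : List String) :
    data.foldl (fun f x => if x ≠ "" then f ++ [x] else f) acc
      = acc ++ data.filter (fun s => s ≠ "") := by
  induction data generalizing acc with
  | nil => simp
  | cons d ds ih =>
    rw [List.foldl_cons, List.filter_cons]
    by_cases h : d = ""
    · subst h
      simpa using ih acc
    · rw [if_pos (by simpa using h)]
      rw [if_pos (show decide (d ≠ "") = true by simp [h])]
      rw [ih (acc ++ [d])]
      simp

-- ===== VERDICT (by name: the statement is the Claim_ definition above) =====
theorem sortField_spec : Claim_equal_sortField := by
  intro data _
  unfold Spec_sortField sortField sortField_alt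
  by_cases hd : data = []
  · simp [hd]
  · rw [if_pos hd, if_pos hd, pvFilter_fold data [], List.nil_append]
    set F := data.filter (fun s => s ≠ "") with hF
    show some ((List.range (F.length - 1)).foldl sortFieldOuter F)
        = some (PySem.List.sorted F (fun x => x) false)
    have hne : ∀ x ∈ F, x ≠ "" := by
      intro x hx
      have := List.of_mem_filter hx
      simpa using this
    have hrun : (List.range (F.length - 1)).foldl sortFieldOuter F
        = pvSsel (F.length - 1) F := by
      have := pvOuter_run (F.length - 1) [] F hne
      simpa [List.range_eq_range'] using this
    rw [hrun]
    congr 1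
    exact Eq.symm (PySem.List.sorted_id_eq_of_perm_of_pairwise _ _
      (pvSsel_perm (F.length - 1) F) (pvSsel_pairwise (F.length - 1) F (by omega)))
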